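-- pv_equiv track=rewrite | github.com/pki2026/tablemap-scanner-v3 | main.py | _leading_ws_units
-- ===== SOURCE A (Python) =====
-- def _leading_ws_units(s: str) -> int:
--     """Vergleichbare Einrückung (Leerzeichen + Tab als 4)."""
--     u = 0
--     for ch in s:
--         if ch == " ":
--             u += 1
--         elif ch == "\t":
--             u += 4
--         else:
--             break
--     return u
-- ===== SOURCE B (Python) =====
-- def _leading_ws_units(s: str) -> int:
--     """Vergleichbare Einrückung (Leerzeichen + Tab als 4)."""
--     pre = s[:len(s) - len(s.lstrip(" \t"))]
--     return pre.count(" ") + 4 * pre.count("\t")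
-- ===== Notes on version B (the rewrite author's own statement) =====
-- stated objective: idiomatic
-- what changed: Replaces the accumulating early-break character loop with a find-prefix-then-tally decomposition: slice off the leading space/tab run via lstrip length arithmetic, then tally the prefix with two str.count calls.
import Mathlib
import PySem

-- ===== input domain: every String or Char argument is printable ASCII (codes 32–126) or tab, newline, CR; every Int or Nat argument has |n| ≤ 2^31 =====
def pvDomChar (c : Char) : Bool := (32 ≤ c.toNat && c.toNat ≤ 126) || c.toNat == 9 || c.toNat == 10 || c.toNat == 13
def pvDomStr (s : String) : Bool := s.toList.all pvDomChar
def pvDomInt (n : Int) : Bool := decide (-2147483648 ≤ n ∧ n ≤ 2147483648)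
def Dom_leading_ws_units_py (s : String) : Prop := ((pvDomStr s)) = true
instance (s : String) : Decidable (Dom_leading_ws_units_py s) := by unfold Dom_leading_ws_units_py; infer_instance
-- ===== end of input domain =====

-- B replaces A's accumulating early-break loop by slicing off the leading space/tab
-- run (via lstrip(" \t") length arithmetic) and tallying it with two count calls (idiomatic).

-- ===== PORT A =====
-- the for-loop with break, carrying the accumulator u
def pvALoop : List Char → Int → Int
  | [], u => u
  | c :: rest, u =>
      if c = ' ' then pvALoop rest (u + 1)
      else if c = '\t' then pvALoop rest (u + 4)
      else u

def leading_ws_units_py (s : String) : Int := pvALoop s.toList 0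

-- ===== PORT B =====
-- exact hand port of s.lstrip(" \t"): drop leading chars that are ' ' or '\t'
-- (PySem has no chars-argument lstrip; dropWhile over the two chars is exact)
def pvLstripST (cs : List Char) : List Char :=
  cs.dropWhile (fun c => c == ' ' || c == '\t')

def leading_ws_units_py_alt (s : String) : Int :=
  let cs := s.toList
  let pre := PySem.List.slice cs none (some ((cs.length : Int) - ((pvLstripST cs).length : Int)))
  (PySem.Chars.count pre [' '] : Int) + 4 * (PySem.Chars.count pre ['\t'] : Int)

-- ===== PRECONDITION & SPEC =====
def Spec_leading_ws_units_py (s : String) (out : Int) : Prop := out = leading_ws_units_py_alt s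
instance (s : String) (out : Int) : Decidable (Spec_leading_ws_units_py s out) := by unfold Spec_leading_ws_units_py; infer_instance

-- ===== CLAIM (what is proved, stated in full; the proofs are below) =====
def Claim_equal_leading_ws_units_py : Prop := ∀ (s : String), Dom_leading_ws_units_py s → Spec_leading_ws_units_py s (leading_ws_units_py s)

-- ===== LEMMAS AND PROOFS =====

-- single-character substring count is character count
theorem pvCount_go_singleton (c : Char) (l : List Char) (acc : Nat) :
    PySem.Chars.count.go [c] l.length l acc = acc + l.count c := by
  induction l generalizing acc with
  | nil => simp [PySem.Chars.count.go]
  | cons h t ih =>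
      simp only [List.length_cons, PySem.Chars.count.go, List.isPrefixOf,
        List.count_cons]
      by_cases hc : c = h
      · subst hc
        simp [ih]
        omega
      · have h1 : (c == h) = false := by simp [hc]
        have h2 : (h == c) = false := by simp [Ne.symm hc]
        simp [h1, h2, ih]

theorem pvCount_singleton (c : Char) (l : List Char) :
    PySem.Chars.count l [c] = l.count c := by
  simp [PySem.Chars.count, pvCount_go_singleton]

-- the slice B takes is exactly the takeWhile prefix of spaces/tabs
theorem pvPre_eq_takeWhile (cs : List Char) :
    PySem.List.slice cs none (some ((cs.length : Int) - ((pvLstripST cs).length : Int)))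
      = cs.takeWhile (fun c => c == ' ' || c == '\t') := by
  have hsplit := List.takeWhile_append_dropWhile (p := fun c => c == ' ' || c == '\t') (l := cs)
  have hl := congrArg List.length hsplit
  rw [List.length_append] at hl
  have htw : cs.length - (pvLstripST cs).length
      = (cs.takeWhile (fun c => c == ' ' || c == '\t')).length := by
    simp only [pvLstripST]
    omega
  have hcast : ((cs.length : Int) - ((pvLstripST cs).length : Int))
      = ((cs.length - (pvLstripST cs).length : Nat) : Int) := by
    simp only [pvLstripST]
    omega
  rw [hcast, PySem.List.slice_to_natCast, htw]
  exact ((List.prefix_iff_eq_take).mp (List.takeWhile_prefix _)).symm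

-- A's loop computes u + spaces + 4*tabs of the takeWhile prefix
theorem pvALoop_eq (cs : List Char) (u : Int) :
    pvALoop cs u = u + ((cs.takeWhile (fun c => c == ' ' || c == '\t')).count ' ' : Int)
      + 4 * ((cs.takeWhile (fun c => c == ' ' || c == '\t')).count '\t' : Int) := by
  induction cs generalizing u with
  | nil => simp [pvALoop]
  | cons c t ih =>
      by_cases hsp : c = ' '
      · subst hsp
        simp [pvALoop, ih]
        ring
      · by_cases htab : c = '\t'
        · subst htab
          simp [pvALoop, ih]
          ring
        · have h1 : (c == ' ') = false := by simp [hsp]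
          have h2 : (c == '\t') = false := by simp [htab]
          simp [pvALoop, hsp, htab, h1, h2]

-- ===== VERDICT (by name: the statement is the Claim_ definition above) =====
theorem leading_ws_units_py_spec : Claim_equal_leading_ws_units_py := by
  intro s _
  unfold Spec_leading_ws_units_py leading_ws_units_py leading_ws_units_py_alt
  simp only [pvPre_eq_takeWhile, pvCount_singleton, pvALoop_eq]
  ring
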